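-- pv_equiv track=rewrite | github.com/lizhuojunx86/huadian | services/pipeline/src/huadian_pipeline/sources/ctext.py | _parse_paragraphs
-- ===== SOURCE A (Python) =====
-- def _parse_paragraphs(raw: str) -> list[str]:
--     """Parse fixture text into paragraphs.
--
--     Skips comment lines (starting with #) and blank lines.
--     Consecutive non-blank, non-comment lines form one paragraph.
--     Paragraphs are separated by blank lines.
--     """
--     lines = raw.strip().split("\n")
--     paragraphs: list[str] = []
--     current: list[str] = []
--
--     for line in lines:
--         stripped = line.strip()
--         # Skip comment lines
--         if stripped.startswith("#"):
--             continue
--         if stripped == "":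
--             if current:
--                 paragraphs.append("".join(current))
--                 current = []
--         else:
--             current.append(stripped)
--
--     if current:
--         paragraphs.append("".join(current))
--
--     # Filter out very short "paragraphs" that are likely artifacts
--     return [p for p in paragraphs if len(p) >= 4]
-- ===== SOURCE B (Python) =====
-- def _parse_paragraphs(raw: str) -> list[str]:
--     """Filter-then-group: strip all lines and drop comments first, then scan
--     maximal non-blank blocks as paragraphs."""
--     kept = [s for s in (line.strip() for line in raw.strip().split("\n"))
--             if not s.startswith("#")]
--     paragraphs = []
--     i, n = 0, len(kept)
--     while i < n:
--         if kept[i] == "":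
--             i += 1
--         else:
--             j = i
--             while j < n and kept[j] != "":
--                 j += 1
--             paragraphs.append("".join(kept[i:j]))
--             i = j
--     return [p for p in paragraphs if len(p) >= 4]
-- ===== Notes on version B (the rewrite author's own statement) =====
-- stated objective: alternative
-- what changed: A's single stateful accumulate/flush loop (current-paragraph buffer flushed on blanks and at EOF) is replaced by a filter-then-group pipeline: strip all lines and drop comment lines first, then scan maximal non-blank blocks with an inner while (takeWhile-style) to form paragraphs.
import Mathlib
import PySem

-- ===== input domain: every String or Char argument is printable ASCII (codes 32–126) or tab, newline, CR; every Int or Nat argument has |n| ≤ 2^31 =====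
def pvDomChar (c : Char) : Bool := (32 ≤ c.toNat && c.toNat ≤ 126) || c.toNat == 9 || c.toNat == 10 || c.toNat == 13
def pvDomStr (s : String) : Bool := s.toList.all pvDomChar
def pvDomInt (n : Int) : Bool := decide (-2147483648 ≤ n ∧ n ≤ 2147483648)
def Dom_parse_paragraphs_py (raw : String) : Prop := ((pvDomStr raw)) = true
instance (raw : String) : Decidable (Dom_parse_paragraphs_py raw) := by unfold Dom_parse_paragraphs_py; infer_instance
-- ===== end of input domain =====

-- B replaces A's single stateful accumulate/flush loop by a filter-then-group pipeline (strip lines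
-- and drop comments first, then scan maximal non-blank blocks); objective: alternative decomposition.

-- ===== PORT A =====
-- A's loop body applied to an already-stripped line (state = (paragraphs, current))
def pvStepA (st : List String × List String) (s : String) : List String × List String :=
  if PySem.Str.startswith s "#" then st
  else if s = "" then (if st.2 ≠ [] then (st.1 ++ [PySem.Str.join "" st.2], []) else st)
  else (st.1, st.2 ++ [s])

-- s.split("\n") with a nonempty separator always succeeds, hence the .getD []
def parse_paragraphs_py (raw : String) : List String :=
  let lines := (PySem.Str.split? (PySem.Str.strip raw) "\n").getD []
  let r := lines.foldl (fun st line => pvStepA st (PySem.Str.strip line)) ([], [])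
  let paragraphs := if r.2 ≠ [] then r.1 ++ [PySem.Str.join "" r.2] else r.1
  paragraphs.filter (fun p => decide (4 ≤ PySem.Str.len p))

-- ===== PORT B =====
-- the two-index while loops of Source B: the inner scan up to the next blank line is takeWhile/dropWhile
def pvGroups : List String → List String
  | [] => []
  | s :: rest =>
    if s = "" then pvGroups rest
    else PySem.Str.join "" (s :: rest.takeWhile (fun t => t ≠ "")) ::
         pvGroups (rest.dropWhile (fun t => t ≠ ""))
termination_by l => l.length
decreasing_by
  · simp
  · exact Nat.lt_succ_of_le (List.length_dropWhile_le _ _)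

def parse_paragraphs_py_alt (raw : String) : List String :=
  let kept := (((PySem.Str.split? (PySem.Str.strip raw) "\n").getD []).map PySem.Str.strip).filter
      (fun s => !PySem.Str.startswith s "#")
  (pvGroups kept).filter (fun p => decide (4 ≤ PySem.Str.len p))

-- ===== PRECONDITION & SPEC =====
def Spec_parse_paragraphs_py (raw : String) (out : List String) : Prop := out = parse_paragraphs_py_alt raw
instance (raw : String) (out : List String) : Decidable (Spec_parse_paragraphs_py raw out) := by unfold Spec_parse_paragraphs_py; infer_instance

-- ===== CLAIM (what is proved, stated in full; the proofs are below) =====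
def Claim_equal_parse_paragraphs_py : Prop := ∀ (raw : String), Dom_parse_paragraphs_py raw → Spec_parse_paragraphs_py raw (parse_paragraphs_py raw)

-- ===== LEMMAS AND PROOFS =====

-- A's loop, rephrased as recursion on the remaining (comment-free) lines with current paragraph C
def pvH : List String → List String → List String
  | C, [] => if C = [] then [] else [PySem.Str.join "" C]
  | C, s :: rest =>
    if s = "" then (if C = [] then pvH [] rest else PySem.Str.join "" C :: pvH [] rest)
    else pvH (C ++ [s]) rest

theorem stepA_comment (st : List String × List String) (s : String)
    (h : PySem.Str.startswith s "#" = true) : pvStepA st s = st := by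
  unfold pvStepA; rw [if_pos h]

theorem stepA_nonc (st : List String × List String) (s : String)
    (h : PySem.Str.startswith s "#" = false) :
    pvStepA st s = if s = "" then (if st.2 ≠ [] then (st.1 ++ [PySem.Str.join "" st.2], []) else st)
                   else (st.1, st.2 ++ [s]) := by
  unfold pvStepA; rw [if_neg (by simp only [h]; decide)]

theorem foldl_filter (xs : List String) (st : List String × List String) :
    xs.foldl pvStepA st = (xs.filter (fun s => !PySem.Str.startswith s "#")).foldl pvStepA st := by
  induction xs generalizing st with
  | nil => rfl
  | cons x xs ih =>
    by_cases h : PySem.Str.startswith x "#" = true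
    · rw [List.foldl_cons, stepA_comment st x h, List.filter_cons, if_neg (by simp only [h]; decide), ih]
    · simp only [Bool.not_eq_true] at h
      rw [List.foldl_cons, List.filter_cons, if_pos (by simp only [h]; decide), List.foldl_cons, ih]

theorem foldl_flush (xs : List String)
    (hx : ∀ s ∈ xs, PySem.Str.startswith s "#" = false) (P C : List String) :
    (if (xs.foldl pvStepA (P, C)).2 ≠ [] then
        (xs.foldl pvStepA (P, C)).1 ++ [PySem.Str.join "" (xs.foldl pvStepA (P, C)).2]
     else (xs.foldl pvStepA (P, C)).1) = P ++ pvH C xs := by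
  induction xs generalizing P C with
  | nil => by_cases hC : C = [] <;> simp [pvH, hC]
  | cons s rest ih =>
    have hs : PySem.Str.startswith s "#" = false := hx s (by simp)
    have hrest : ∀ t ∈ rest, PySem.Str.startswith t "#" = false :=
      fun t ht => hx t (List.mem_cons_of_mem _ ht)
    by_cases hb : s = ""
    · subst hb
      by_cases hC : C = []
      · subst hC
        have hstep : pvStepA (P, []) "" = (P, []) := by
          rw [stepA_nonc _ _ hs]; simp
        rw [List.foldl_cons, hstep, ih hrest]
        simp [pvH]
      · have hstep : pvStepA (P, C) "" = (P ++ [PySem.Str.join "" C], []) := by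
          rw [stepA_nonc _ _ hs]; simp [hC]
        rw [List.foldl_cons, hstep, ih hrest]
        simp [pvH, hC, List.append_assoc]
    · have hstep : pvStepA (P, C) s = (P, C ++ [s]) := by
        rw [stepA_nonc _ _ hs, if_neg hb]
      rw [List.foldl_cons, hstep, ih hrest]
      simp [pvH, hb]

theorem pvH_nonempty (xs : List String) (C : List String) (hC : C ≠ []) :
    pvH C xs = PySem.Str.join "" (C ++ xs.takeWhile (fun t => t ≠ "")) ::
               pvH [] (xs.dropWhile (fun t => t ≠ "")) := by
  induction xs generalizing C with
  | nil => simp [pvH, hC]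
  | cons s rest ih =>
    by_cases hb : s = ""
    · simp [pvH, hb, hC]
    · rw [pvH, if_neg hb, ih (C ++ [s]) (by simp)]
      simp [hb, List.append_assoc]

theorem pvH_nil_eq_pvGroups (n : Nat) : ∀ xs : List String, xs.length ≤ n → pvH [] xs = pvGroups xs := by
  induction n with
  | zero =>
    intro xs h
    have hx : xs = [] := List.eq_nil_of_length_eq_zero (Nat.le_zero.mp h)
    subst hx; simp [pvH, pvGroups]
  | succ n ih =>
    intro xs h
    match xs with
    | [] => simp [pvH, pvGroups]
    | s :: rest =>
      by_cases hb : s = ""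
      · rw [pvH, if_pos hb, if_pos rfl, pvGroups, if_pos hb]
        exact ih rest (by simp at h; omega)
      · rw [pvH, if_neg hb, List.nil_append, pvH_nonempty rest [s] (by simp), pvGroups, if_neg hb,
            ih (rest.dropWhile (fun t => t ≠ ""))
              (le_trans (List.length_dropWhile_le _ _) (by simp at h; omega))]
        rfl

theorem pvKey (lines : List String) :
    (if (lines.foldl (fun st line => pvStepA st (PySem.Str.strip line)) ([], [])).2 ≠ [] then
       (lines.foldl (fun st line => pvStepA st (PySem.Str.strip line)) ([], [])).1 ++
         [PySem.Str.join "" (lines.foldl (fun st line => pvStepA st (PySem.Str.strip line)) ([], [])).2]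
     else (lines.foldl (fun st line => pvStepA st (PySem.Str.strip line)) ([], [])).1)
    = pvGroups ((lines.map PySem.Str.strip).filter (fun s => !PySem.Str.startswith s "#")) := by
  rw [← List.foldl_map, foldl_filter,
      foldl_flush _ (fun s hs => by simpa using (List.mem_filter.mp hs).2) [] [],
      List.nil_append]
  exact pvH_nil_eq_pvGroups _ _ le_rfl

-- ===== VERDICT (by name: the statement is the Claim_ definition above) =====
theorem parse_paragraphs_py_spec : Claim_equal_parse_paragraphs_py := by
  intro raw _
  unfold Spec_parse_paragraphs_py parse_paragraphs_py parse_paragraphs_py_alt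
  exact congrArg (List.filter (fun p => decide (4 ≤ PySem.Str.len p)))
    (pvKey ((PySem.Str.split? (PySem.Str.strip raw) "\n").getD []))
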